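-- pv_equiv track=rewrite | github.com/mike006322/ProjectEuler | Solutions/PE033_digit_canceling_fractions/digit_canceling_fractions.py | has_digits
-- ===== SOURCE A (Python) =====
-- def has_digits(number, digits):
--     """
--     return boolean whether number has digits in the order that digits is in
--     """
--     digits = list(digits)
--     num = [int(x) for x in str(number)]
--     while digits:
--         d = digits.pop(0)
--         if d in num:
--             num.remove(d)
--         else:
--             return False
--     return True
-- ===== SOURCE B (Python) =====
-- def has_digits(number, digits):
--     """
--     return boolean whether number has digits in the order that digits is in
--     """
--     num = [int(x) for x in str(number)]
--     ds = list(digits)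
--     return all(ds.count(d) <= num.count(d) for d in set(ds))
-- ===== Notes on version B (the rewrite author's own statement) =====
-- stated objective: simpler
-- what changed: Replaces A's destructive pop-first/remove/early-return loop by a direct multiset-containment test: compare the count of each distinct requested digit in digits with its count in the number's digits.
import Mathlib
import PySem

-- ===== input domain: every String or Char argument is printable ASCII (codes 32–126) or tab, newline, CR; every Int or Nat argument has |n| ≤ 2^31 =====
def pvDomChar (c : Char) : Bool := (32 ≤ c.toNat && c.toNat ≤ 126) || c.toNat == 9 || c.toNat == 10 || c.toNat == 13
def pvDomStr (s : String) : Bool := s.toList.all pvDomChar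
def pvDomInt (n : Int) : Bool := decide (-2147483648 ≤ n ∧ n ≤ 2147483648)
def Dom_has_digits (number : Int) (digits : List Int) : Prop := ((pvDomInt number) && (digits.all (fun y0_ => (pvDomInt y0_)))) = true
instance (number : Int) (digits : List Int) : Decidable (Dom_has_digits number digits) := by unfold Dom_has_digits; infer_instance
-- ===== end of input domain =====

-- B replaces A's pop-first/remove/early-return loop by a per-distinct-digit count comparison
-- (multiset containment); equivalence of RETURN values on number ≥ 0 (A raises ValueError on
-- negative number, as does B — excluded by Pre_).

-- ===== PORT A =====
-- num = [int(x) for x in str(number)]; int(x) succeeds for every char of str(number) when number ≥ 0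
-- (negative numbers are excluded by Pre_has_digits; the .getD 0 is never reached there).
def pvNumDigits (number : Int) : List Int :=
  (PySem.Int.toChars number).map (fun c => (PySem.Int.ofChars? [c]).getD 0)

-- the while loop: pop the first requested digit, remove its first occurrence or return False
def pvLoopA : List Int → List Int → Bool
  | [], _ => true
  | d :: rest, num =>
      if num.contains d then pvLoopA rest ((PySem.List.remove? num d).getD num)
      else false

def has_digits (number : Int) (digits : List Int) : Bool :=
  pvLoopA digits (pvNumDigits number)

-- ===== PORT B =====
-- all(ds.count(d) <= num.count(d) for d in set(ds)) — order-independent consumption of the set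
def has_digits_alt (number : Int) (digits : List Int) : Bool :=
  let num := pvNumDigits number
  (PySem.Set.ofList digits).all
    (fun d => decide (PySem.List.count digits d ≤ PySem.List.count num d))

-- ===== PRECONDITION & SPEC =====
-- Pre_ excludes negative numbers only: there str(number) starts with '-' and both A and B raise
-- ValueError in the comprehension int(x).
def Pre_has_digits (number : Int) (digits : List Int) : Prop := 0 ≤ number
instance (number : Int) (digits : List Int) : Decidable (Pre_has_digits number digits) := by
  unfold Pre_has_digits; infer_instance

def pvWitness_has_digits : Int × List Int := (1306, [3, 0, 6])

def Spec_has_digits (number : Int) (digits : List Int) (out : Bool) : Prop := out = has_digits_alt number digits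
instance (number : Int) (digits : List Int) (out : Bool) : Decidable (Spec_has_digits number digits out) := by unfold Spec_has_digits; infer_instance

-- ===== CLAIM (what is proved, stated in full; the proofs are below) =====
def Claim_equal_has_digits : Prop := ∀ (number : Int) (digits : List Int), Dom_has_digits number digits → Pre_has_digits number digits → Spec_has_digits number digits (has_digits number digits)

-- ===== LEMMAS AND PROOFS =====

-- A's loop succeeds exactly when the requested digits are contained as a multiset.
theorem pvLoopA_iff (ds : List Int) : ∀ num : List Int,
    pvLoopA ds num = true ↔ ∀ x : Int, ds.count x ≤ num.count x := by
  induction ds with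
  | nil => intro num; simp [pvLoopA]
  | cons d rest ih =>
    intro num
    by_cases hmem : d ∈ num
    · have hrem : PySem.List.remove? num d = some (num.erase d) :=
        PySem.List.remove?_eq_some_erase num d hmem
      have hcontains : num.contains d = true := by
        simpa using hmem
      have hd : 1 ≤ num.count d := List.count_pos_iff.mpr hmem
      simp only [pvLoopA, hcontains, hrem, Option.getD_some, if_true, ih]
      constructor
      · intro h x
        have hx := h x
        rw [List.count_erase] at hx
        rw [List.count_cons]
        by_cases hxd : x = d
        · subst hxd; simp at hx ⊢; omega
        · simp [Ne.symm hxd] at hx ⊢; omega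
      · intro h x
        have hx := h x
        rw [List.count_cons] at hx
        rw [List.count_erase]
        by_cases hxd : x = d
        · subst hxd; simp at hx ⊢; omega
        · simp [Ne.symm hxd] at hx ⊢; omega
    · have hcontains : num.contains d = false := by
        simpa using hmem
      simp only [pvLoopA, hcontains]
      constructor
      · intro h; cases h
      · intro h
        exfalso
        have := h d
        have hz : num.count d = 0 := List.count_eq_zero.mpr hmem
        simp [hz] at this

-- B's set-driven test says the same thing.
theorem alt_iff (number : Int) (digits : List Int) :
    has_digits_alt number digits = true ↔
      ∀ x : Int, digits.count x ≤ (pvNumDigits number).count x := by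
  unfold has_digits_alt
  simp only [List.all_eq_true, decide_eq_true_eq]
  constructor
  · intro h x
    by_cases hx : x ∈ digits
    · have hx' : x ∈ PySem.Set.ofList digits := by
        simpa [PySem.Set.mem_ofList] using hx
      simpa [PySem.List.count] using h x hx'
    · simp [List.count_eq_zero.mpr hx]
  · intro h d _
    simpa [PySem.List.count] using h d

-- ===== VERDICT (by name: the statement is the Claim_ definition above) =====
theorem has_digits_spec : Claim_equal_has_digits := by
  intro number digits _ _
  unfold Spec_has_digits
  have hA := pvLoopA_iff digits (pvNumDigits number)
  have hB := alt_iff number digits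
  unfold has_digits
  exact Bool.eq_iff_iff.mpr (hA.trans hB.symm)
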